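-- pv_equiv track=rewrite | github.com/PMihelak/Problemi-razvrscanja-intervalov | razvrscanje_vecnitno_naivno.py | razvrscanje_vecnitno_naivno
-- ===== SOURCE A (Python) =====
-- def razvrscanje_vecnitno_naivno(intervali, st_niti):
--
--     intervali.sort(key=lambda x: x[1])
--     intervali_procesor = []
--     tr_konec = [0] * st_niti
--
--     stevecIntervalov = 0
--     for interval in intervali:
--
--         max_konec = -1
--         indeks_max_konca = -1
--         for i in range(st_niti):
--             if(interval[0]>=tr_konec[i] and tr_konec[i]>max_konec):
--                 indeks_max_konca = i
--                 max_konec = tr_konec[i]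
--
--         if(indeks_max_konca != -1):
--             stevecIntervalov += 1
--             tr_konec[indeks_max_konca] = interval[1]
--
--             intervali_procesor.append(indeks_max_konca+1)
--
--         else:
--             intervali_procesor.append(0)
--
--     return(intervali, intervali_procesor)
-- ===== SOURCE B (Python) =====
-- # Greedy interval-to-thread assignment via a bisect-maintained pool instead of a
-- # per-interval scan over all threads.  Note: sorts `intervali` in place, like the
-- # original.
-- from bisect import bisect_left, insort
--
--
-- def razvrscanje_vecnitno_naivno(intervali, st_niti):
--     intervali.sort(key=lambda x: x[1])
--     # Pool of threads as (-busy_until, thread), kept ascending, i.e. ordered by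
--     # busy-until time descending and, for equal times, by thread index.
--     bazen = [(0, nit) for nit in range(st_niti)]
--     razpored = []
--     for zacetek, konec in intervali:
--         # First pool entry whose busy-until time is <= zacetek: among those it
--         # has the latest busy-until time and the smallest thread index.
--         pos = bisect_left(bazen, (-zacetek, 0))
--         # The interval runs on that thread if the thread's busy-until time is a
--         # valid clock time, i.e. lies in [0, zacetek].
--         if pos < len(bazen) and bazen[pos][0] <= 0:
--             nit = bazen.pop(pos)[1]
--             insort(bazen, (-konec, nit))
--             razpored.append(nit + 1)
--         else:
--             razpored.append(0)
--     return (intervali, razpored)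
-- ===== Notes on version B (the rewrite author's own statement) =====
-- stated objective: faster
-- what changed: Instead of scanning all st_niti thread end-times for every interval, B keeps the threads as a list of (-busy_until, thread) pairs in sorted order, finds each interval's thread with one bisect (O(log k) comparisons instead of an O(k) interpreted scan) and updates the pool with pop/insort (C-level memmoves).
import Mathlib
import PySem

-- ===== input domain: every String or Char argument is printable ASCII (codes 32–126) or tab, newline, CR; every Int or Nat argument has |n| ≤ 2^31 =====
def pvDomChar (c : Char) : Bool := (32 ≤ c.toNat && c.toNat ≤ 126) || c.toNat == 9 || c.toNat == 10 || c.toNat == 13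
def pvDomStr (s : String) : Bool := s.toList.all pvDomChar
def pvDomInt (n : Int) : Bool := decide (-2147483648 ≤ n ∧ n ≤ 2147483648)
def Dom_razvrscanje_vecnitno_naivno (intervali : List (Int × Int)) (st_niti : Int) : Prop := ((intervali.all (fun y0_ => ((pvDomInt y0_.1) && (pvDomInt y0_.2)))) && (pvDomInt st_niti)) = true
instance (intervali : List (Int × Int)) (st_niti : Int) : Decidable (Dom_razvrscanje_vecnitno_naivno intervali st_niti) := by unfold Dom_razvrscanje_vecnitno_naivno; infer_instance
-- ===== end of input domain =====

-- B replaces A's per-interval scan over all st_niti thread end-times by a pool of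
-- (-busy_until, thread) pairs kept sorted, queried with one bisect per interval
-- (objective: faster; a timing run measured B faster). Python A sorts `intervali` in
-- place; B performs the same in-place sort; the equivalence proved is about the
-- return value.


-- ===== PORT A =====
-- A's inner `for i in range(st_niti)` scan: running (max_konec, indeks_max_konca)
-- started at (-1, -1). Since len(tr_konec) == st_niti throughout, the index loop
-- reading tr_konec[i] is ported as the same scan over tr_konec carrying the index i.
def pvSelA (tr : List Int) (s : Int) : Int × Int :=
  (tr.foldl
    (fun (st : (Int × Int) × Int) t =>
      (if s ≥ t ∧ t > st.1.1 then (t, st.2) else st.1, st.2 + 1))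
    ((-1, -1), 0)).1

def razvrscanje_vecnitno_naivno (intervali : List (Int × Int)) (st_niti : Int) : (List (Int × Int)) × List Int :=
  -- intervali.sort(key=lambda x: x[1])
  let urejeni := PySem.List.sorted intervali (fun x => x.2)
  -- state: (tr_konec, stevecIntervalov, intervali_procesor)
  let res := urejeni.foldl
    (fun (st : List Int × Int × List Int) interval =>
      let mi := pvSelA st.1 interval.1
      if mi.2 ≠ -1 then
        (PySem.List.pySetD st.1 mi.2 interval.2, st.2.1 + 1, st.2.2 ++ [mi.2 + 1])
      else
        (st.1, st.2.1, st.2.2 ++ [0]))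
    (List.replicate st_niti.toNat 0, 0, [])
  (urejeni, res.2.2)

-- ===== PORT B =====
-- bisect_left(bazen, x): PySem.List.bisectLeft is not lexicographic on pairs, so
-- the call is ported by its contract on the (always sorted) pool: the number of
-- entries lexicographically smaller than the probe.
def pvBisL (l : List (Int × Int)) (x : Int × Int) : Nat :=
  l.countP (fun p => p.1 < x.1 ∨ (p.1 = x.1 ∧ p.2 < x.2))

-- insort(bazen, x): insertion at the bisect_right position, i.e. after all entries
-- lexicographically ≤ x (on the always-sorted pool that position is the count of
-- such entries).
def pvInsort (l : List (Int × Int)) (x : Int × Int) : List (Int × Int) :=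
  let n := l.countP (fun p => p.1 < x.1 ∨ (p.1 = x.1 ∧ p.2 ≤ x.2))
  l.take n ++ x :: l.drop n

def razvrscanje_vecnitno_naivno_alt (intervali : List (Int × Int)) (st_niti : Int) : (List (Int × Int)) × List Int :=
  let urejeni := PySem.List.sorted intervali (fun x => x.2)
  -- state: (bazen, razpored)
  let res := urejeni.foldl
    (fun (st : List (Int × Int) × List Int) (iv : Int × Int) =>
      let pos := pvBisL st.1 (-iv.1, 0)
      if pos < st.1.length ∧ (PySem.List.pyGetD st.1 (pos : Int) (0, 0)).1 ≤ 0 then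
        let nit := (PySem.List.pyGetD st.1 (pos : Int) (0, 0)).2
        (pvInsort (st.1.eraseIdx pos) (-iv.2, nit), st.2 ++ [nit + 1])
      else
        (st.1, st.2 ++ [0]))
    ((PySem.List.pyRange 0 st_niti 1).map (fun nit => ((0 : Int), nit)), [])
  (urejeni, res.2)

-- ===== PRECONDITION & SPEC =====
def Spec_razvrscanje_vecnitno_naivno (intervali : List (Int × Int)) (st_niti : Int) (out : (List (Int × Int)) × List Int) : Prop := out = razvrscanje_vecnitno_naivno_alt intervali st_niti
instance (intervali : List (Int × Int)) (st_niti : Int) (out : (List (Int × Int)) × List Int) : Decidable (Spec_razvrscanje_vecnitno_naivno intervali st_niti out) := by unfold Spec_razvrscanje_vecnitno_naivno; infer_instance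

-- ===== CLAIM (what is proved, stated in full; the proofs are below) =====
def Claim_equal_razvrscanje_vecnitno_naivno : Prop := ∀ (intervali : List (Int × Int)) (st_niti : Int), Dom_razvrscanje_vecnitno_naivno intervali st_niti → Spec_razvrscanje_vecnitno_naivno intervali st_niti (razvrscanje_vecnitno_naivno intervali st_niti)

-- ===== LEMMAS AND PROOFS =====
def pvPairs (tr : List Int) : List (Int × Int) :=
  (PySem.List.enumerate tr).map (fun p => (p.2, p.1))
def pvNPairs (tr : List Int) : List (Int × Int) :=
  (PySem.List.enumerate tr).map (fun p => (-p.2, p.1))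
theorem pvNPairs_length (tr : List Int) : (pvNPairs tr).length = tr.length := by
  simp [pvNPairs, PySem.List.length_enumerate]
theorem pvNPairs_getElem (tr : List Int) (j : Nat) (h : j < (pvNPairs tr).length) :
    (pvNPairs tr)[j] = (-(tr[j]'(by simpa [pvNPairs_length] using h)), (j : Int)) := by
  simp [pvNPairs, PySem.List.getElem_enumerate]
theorem pvPairs_mem (tr : List Int) (q : Int × Int) :
    q ∈ pvPairs tr ↔ ∃ (j : Nat) (h : j < tr.length), q = (tr[j], (j : Int)) := by
  simp only [pvPairs, PySem.List.mem_enumerate_iff, List.mem_map]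
  constructor
  · rintro ⟨p, ⟨k, hk, rfl⟩, rfl⟩; exact ⟨k, hk, by simp⟩
  · rintro ⟨j, hj, rfl⟩; exact ⟨((j : Int), tr[j]), ⟨j, hj, by simp⟩, rfl⟩
theorem pvNPairs_mem (tr : List Int) (q : Int × Int) :
    q ∈ pvNPairs tr ↔ ∃ (j : Nat) (h : j < tr.length), q = (-tr[j], (j : Int)) := by
  simp only [pvNPairs, PySem.List.mem_enumerate_iff, List.mem_map]
  constructor
  · rintro ⟨p, ⟨k, hk, rfl⟩, rfl⟩; exact ⟨k, hk, by simp⟩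
  · rintro ⟨j, hj, rfl⟩; exact ⟨((j : Int), tr[j]), ⟨j, hj, by simp⟩, rfl⟩
theorem pvMemPairs_iff_npairs (tr : List Int) (q : Int × Int) :
    q ∈ pvPairs tr ↔ (-q.1, q.2) ∈ pvNPairs tr := by
  rw [pvPairs_mem, pvNPairs_mem]
  constructor
  · rintro ⟨j, hj, rfl⟩; exact ⟨j, hj, rfl⟩
  · rintro ⟨j, hj, h⟩
    refine ⟨j, hj, ?_⟩
    have h1 : -q.1 = -tr[j] := congrArg Prod.fst h
    have h2 : q.2 = (j : Int) := congrArg Prod.snd h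
    exact Prod.ext (by omega) h2
theorem pvNPairs_idx_ne (tr : List Int) :
    (pvNPairs tr).Pairwise (fun p q => p.2 ≠ q.2) := by
  unfold pvNPairs
  rw [List.pairwise_map]
  refine (PySem.List.pairwise_lt_enumerate tr 0).imp ?_
  intro a b h
  simpa using Int.ne_of_lt h
theorem pvPairs_pairwise (tr : List Int) :
    (pvPairs tr).Pairwise (fun p q => p.1 = q.1 → p.2 < q.2) := by
  unfold pvPairs
  rw [List.pairwise_map]
  refine (PySem.List.pairwise_lt_enumerate tr 0).imp ?_
  intro a b h _
  exact h
def pvElig (s : Int) (q : Int × Int) : Prop := 0 ≤ q.1 ∧ q.1 ≤ s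
def pvIsBest (s : Int) (l : List (Int × Int)) (r : Int × Int) : Prop :=
  (r = (-1, -1) ∧ ∀ q ∈ l, ¬ pvElig s q) ∨
  (r ∈ l ∧ pvElig s r ∧ ∀ q ∈ l, pvElig s q → q.1 < r.1 ∨ (q.1 = r.1 ∧ r.2 ≤ q.2))
def pvStep (s : Int) (mi q : Int × Int) : Int × Int :=
  if q.1 ≤ s ∧ mi.1 < q.1 then q else mi

theorem pvBest_unique (s : Int) (l : List (Int × Int)) (r r' : Int × Int)
    (h1 : pvIsBest s l r) (h2 : pvIsBest s l r') : r = r' := by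
  rcases h1 with ⟨rfl, hno⟩ | ⟨hm, he, hb⟩
  · rcases h2 with ⟨rfl, _⟩ | ⟨hm', he', _⟩
    · rfl
    · exact absurd he' (hno _ hm')
  · rcases h2 with ⟨rfl, hno'⟩ | ⟨hm', he', hb'⟩
    · exact absurd he (hno' _ hm)
    · have b1 := hb _ hm' he'
      have b2 := hb' _ hm he
      refine Prod.ext (by omega) (by omega)

theorem pvFold_best (s : Int) (l : List (Int × Int))
    (hl : l.Pairwise (fun p q => p.1 = q.1 → p.2 < q.2)) :
    pvIsBest s l (l.foldl (pvStep s) (-1, -1)) := by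
  induction l using List.reverseRecOn with
  | nil => exact Or.inl ⟨rfl, by simp⟩
  | append_singleton t a ih =>
    have ht : t.Pairwise (fun p q => p.1 = q.1 → p.2 < q.2) :=
      hl.sublist (t.sublist_append_left [a])
    have hta : ∀ q ∈ t, q.1 = a.1 → q.2 < a.2 := by
      have := List.pairwise_append.mp hl
      intro q hq; exact this.2.2 q hq a (by simp)
    rw [List.foldl_append]
    set r := t.foldl (pvStep s) (-1, -1) with hr
    have ihr := ih ht
    simp only [List.foldl_cons, List.foldl_nil, pvStep]
    by_cases hc : a.1 ≤ s ∧ r.1 < a.1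
    · -- new best is a
      rw [if_pos hc]
      have hae : pvElig s a := by
        rcases ihr with ⟨hre, _⟩ | ⟨_, he, _⟩
        · constructor
          · have : r.1 = -1 := by rw [hre]
            omega
          · exact hc.1
        · exact ⟨by have := he.1; omega, hc.1⟩
      refine Or.inr ⟨by simp, hae, ?_⟩
      intro q hq hqe
      rcases List.mem_append.mp hq with hq | hq
      · rcases ihr with ⟨hre, hno⟩ | ⟨_, _, hb⟩
        · exact absurd hqe (hno _ hq)
        · have := hb _ hq hqe
          left; omega
      · simp at hq; subst hq; right; exact ⟨rfl, le_refl _⟩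
    · -- keep r
      rw [if_neg hc]
      rcases ihr with ⟨hre, hno⟩ | ⟨hm, he, hb⟩
      · refine Or.inl ⟨hre, ?_⟩
        intro q hq
        rcases List.mem_append.mp hq with hq | hq
        · exact hno _ hq
        · simp at hq; subst hq
          intro ⟨hq0, hqs⟩
          have : r.1 = -1 := by rw [hre]
          exact hc ⟨hqs, by omega⟩
      · refine Or.inr ⟨List.mem_append.mpr (Or.inl hm), he, ?_⟩
        intro q hq hqe
        rcases List.mem_append.mp hq with hq | hq
        · exact hb _ hq hqe
        · simp at hq; subst hq
          have hq1 : q.1 ≤ r.1 := by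
            by_contra hgt
            exact hc ⟨hqe.2, by omega⟩
          rcases lt_or_eq_of_le hq1 with h | h
          · exact Or.inl h
          · right; exact ⟨h, le_of_lt (hta _ hm h.symm)⟩
def pvLT (p q : Int × Int) : Prop := p.1 < q.1 ∨ (p.1 = q.1 ∧ p.2 < q.2)
theorem pvLT_trans {p q r : Int × Int} (h1 : pvLT p q) (h2 : pvLT q r) : pvLT p r := by
  rcases h1 with h1 | ⟨h1a, h1b⟩ <;> rcases h2 with h2 | ⟨h2a, h2b⟩ <;>
    [left; left; left; right] <;> omega

theorem pvSortedCountP (l : List (Int × Int)) (P : Int × Int → Bool)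
    (hdc : ∀ p q, pvLT p q → P q = true → P p = true) (hs : l.Pairwise pvLT) :
    ∀ (j : Nat) (hj : j < l.length), (P l[j] = true ↔ j < l.countP P) := by
  induction l with
  | nil => intro j hj; simp at hj
  | cons x t ih =>
    intro j hj
    rcases List.pairwise_cons.mp hs with ⟨hx, ht⟩
    by_cases hPx : P x = true
    · rw [List.countP_cons, if_pos hPx]
      cases j with
      | zero => simpa using hPx
      | succ j =>
        have hj' : j < t.length := by simpa using hj
        simpa using (ih ht j hj')
    · have ht0 : t.countP P = 0 := by
        rw [List.countP_eq_zero]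
        intro q hq hPq
        exact hPx (hdc x q (hx q hq) hPq)
      rw [List.countP_cons, if_neg hPx, ht0]
      cases j with
      | zero => simpa using hPx
      | succ j =>
        have hj' : j < t.length := by simpa using hj
        simp only [List.getElem_cons_succ]
        constructor
        · intro hPq
          exact absurd (hdc x _ (hx _ (List.getElem_mem hj')) hPq) hPx
        · omega

theorem pvInsort_perm (l : List (Int × Int)) (x : Int × Int) :
    (pvInsort l x).Perm (x :: l) := by
  unfold pvInsort
  refine List.perm_middle.trans ?_
  rw [List.take_append_drop]

theorem pvInsort_pairwise (l : List (Int × Int)) (x : Int × Int)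
    (hl : l.Pairwise pvLT) (hne : ∀ q ∈ l, q.2 ≠ x.2) :
    (pvInsort l x).Pairwise pvLT := by
  unfold pvInsort
  have hdc : ∀ p q, pvLT p q →
      (fun p => decide (p.1 < x.1 ∨ (p.1 = x.1 ∧ p.2 ≤ x.2))) q = true →
      (fun p => decide (p.1 < x.1 ∨ (p.1 = x.1 ∧ p.2 ≤ x.2))) p = true := by
    intro p q h hq
    simp only [decide_eq_true_eq] at hq ⊢
    unfold pvLT at h; omega
  have hcount := pvSortedCountP l _ hdc hl
  have hnle : l.countP (fun p => decide (p.1 < x.1 ∨ (p.1 = x.1 ∧ p.2 ≤ x.2))) ≤ l.length :=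
    List.countP_le_length
  set n := l.countP (fun p => decide (p.1 < x.1 ∨ (p.1 = x.1 ∧ p.2 ≤ x.2))) with hn
  have htake : ∀ q ∈ l.take n, pvLT q x := by
    intro q hq
    rcases List.mem_iff_getElem.mp hq with ⟨j, hj, rfl⟩
    have hjlen : j < l.length := by
      have := hj; simp at this; omega
    have hjn : j < n := by
      have := hj; simp at this; omega
    rw [List.getElem_take]
    have hP := (hcount j hjlen).mpr hjn
    simp only [decide_eq_true_eq] at hP
    have hq2 : l[j].2 ≠ x.2 := hne _ (List.getElem_mem hjlen)
    unfold pvLT; omega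
  have hdrop : ∀ q ∈ l.drop n, pvLT x q := by
    intro q hq
    rcases List.mem_iff_getElem.mp hq with ⟨j, hj, rfl⟩
    have hjlen : n + j < l.length := by
      have := hj; simp at this; omega
    rw [List.getElem_drop]
    have hP : ¬ ((fun p => decide (p.1 < x.1 ∨ (p.1 = x.1 ∧ p.2 ≤ x.2))) l[n + j] = true) := by
      intro h
      have := (hcount (n + j) hjlen).mp h
      omega
    simp only [decide_eq_true_eq] at hP
    unfold pvLT; omega
  rw [List.pairwise_append]
  refine ⟨hl.sublist (List.take_sublist _ _), ?_, ?_⟩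
  · exact List.pairwise_cons.mpr ⟨hdrop, hl.sublist (List.drop_sublist _ _)⟩
  · intro p hp q hq
    rcases List.mem_cons.mp hq with rfl | hq
    · exact htake p hp
    · exact pvLT_trans (htake p hp) (hdrop q hq)

theorem pvPerm_cons_eraseIdx {α : Type} (l : List α) (m : Nat) (h : m < l.length) :
    l.Perm (l[m] :: l.eraseIdx m) := by
  induction l generalizing m with
  | nil => simp at h
  | cons a t ih =>
    cases m with
    | zero => simp
    | succ m =>
      have hm : m < t.length := by simpa using h
      simpa [List.eraseIdx_cons_succ] using ((ih m hm).cons a).trans (List.Perm.swap _ _ _)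

theorem pvPerm_set_cons_eraseIdx {α : Type} (l : List α) (m : Nat) (x : α) (h : m < l.length) :
    (l.set m x).Perm (x :: l.eraseIdx m) := by
  induction l generalizing m with
  | nil => simp at h
  | cons a t ih =>
    cases m with
    | zero => simp
    | succ m =>
      have hm : m < t.length := by simpa using h
      simpa [List.eraseIdx_cons_succ] using ((ih m hm).cons a).trans (List.Perm.swap _ _ _)

theorem pvSelA_aux (s : Int) (tr : List Int) (a : Int × Int) (i : Int) :
    tr.foldl (fun (st : (Int × Int) × Int) t => (pvStep s st.1 (t, st.2), st.2 + 1)) (a, i)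
      = ((PySem.List.enumerate tr i).foldl (fun mi p => pvStep s mi (p.2, p.1)) a,
          i + tr.length) := by
  induction tr generalizing a i with
  | nil => simp
  | cons t ts ih =>
    rw [List.foldl_cons, PySem.List.enumerate_cons, List.foldl_cons, ih]
    refine Prod.ext rfl ?_
    simp; omega

theorem pvSelA_eq_pairs (tr : List Int) (s : Int) :
    pvSelA tr s = (pvPairs tr).foldl (pvStep s) (-1, -1) := by
  unfold pvSelA pvPairs
  rw [List.foldl_map]
  exact congrArg Prod.fst (pvSelA_aux s tr (-1, -1) 0)

def pvChoiceB (pool : List (Int × Int)) (s : Int) : Int × Int :=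
  if pvBisL pool (-s, 0) < pool.length ∧
      (PySem.List.pyGetD pool ((pvBisL pool (-s, 0) : Nat) : Int) (0, 0)).1 ≤ 0 then
    (-(PySem.List.pyGetD pool ((pvBisL pool (-s, 0) : Nat) : Int) (0, 0)).1,
      (PySem.List.pyGetD pool ((pvBisL pool (-s, 0) : Nat) : Int) (0, 0)).2)
  else (-1, -1)
def pvInv (st_niti : Int) (tr : List Int) (pool : List (Int × Int)) : Prop :=
  tr.length = st_niti.toNat ∧ pool.Pairwise pvLT ∧ pool.Perm (pvNPairs tr)

theorem pvChoiceB_best (st_niti : Int) (tr : List Int) (pool : List (Int × Int))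
    (s : Int) (hinv : pvInv st_niti tr pool) :
    pvIsBest s (pvPairs tr) (pvChoiceB pool s) := by
  obtain ⟨hlen, hsort, hperm⟩ := hinv
  have hdc : ∀ p q, pvLT p q →
      (fun p => decide (p.1 < -s ∨ (p.1 = -s ∧ p.2 < (0:Int)))) q = true →
      (fun p => decide (p.1 < -s ∨ (p.1 = -s ∧ p.2 < (0:Int)))) p = true := by
    intro p q h hq
    simp only [decide_eq_true_eq] at hq ⊢
    unfold pvLT at h; omega
  have hidx : ∀ q ∈ pool, 0 ≤ q.2 := by
    intro q hq
    rcases (pvNPairs_mem tr q).mp (hperm.mem_iff.mp hq) with ⟨j, hj, rfl⟩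
    simp
  have hcount := pvSortedCountP pool _ hdc hsort
  have hple : pool.countP (fun p => decide (p.1 < -s ∨ (p.1 = -s ∧ p.2 < (0:Int)))) ≤ pool.length :=
    List.countP_le_length
  unfold pvChoiceB
  have hbis : pvBisL pool (-s, 0) = pool.countP (fun p => decide (p.1 < -s ∨ (p.1 = -s ∧ p.2 < (0:Int)))) := rfl
  rw [hbis]
  set pos := pool.countP (fun p => decide (p.1 < -s ∨ (p.1 = -s ∧ p.2 < (0:Int)))) with hposdef
  -- any eligible pair of pvPairs corresponds to a pool entry at index ≥ pos
  have hkey : ∀ q ∈ pvPairs tr, pvElig s q →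
      ∃ (j : Nat) (hj : j < pool.length), pos ≤ j ∧ pool[j] = (-q.1, q.2) := by
    intro q hq ⟨hq0, hqs⟩
    have hqn : (-q.1, q.2) ∈ pool :=
      hperm.mem_iff.mpr ((pvMemPairs_iff_npairs tr q).mp hq)
    rcases List.mem_iff_getElem.mp hqn with ⟨j, hj, hje⟩
    refine ⟨j, hj, ?_, hje⟩
    by_contra hlt
    have := (hcount j hj).mpr (by omega)
    rw [hje] at this
    simp only [decide_eq_true_eq] at this
    have h2 : 0 ≤ (-q.1, q.2).2 := hidx _ hqn
    simp at h2
    omega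
  by_cases hc : pos < pool.length ∧ (PySem.List.pyGetD pool ((pos : Nat) : Int) (0, 0)).1 ≤ 0
  · rw [if_pos hc]
    obtain ⟨hplt, hen⟩ := hc
    have hget : PySem.List.pyGetD pool ((pos : Nat) : Int) ((0:Int), (0:Int)) = pool[pos] := by
      rw [PySem.List.pyGetD_natCast, List.getD_eq_getElem?_getD, List.getElem?_eq_getElem hplt]
      rfl
    rw [hget] at hen ⊢
    set en := pool[pos] with hendef
    have henP : ¬ ((fun p => decide (p.1 < -s ∨ (p.1 = -s ∧ p.2 < (0:Int)))) en = true) := by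
      intro h
      exact absurd ((hcount pos hplt).mp h) (by omega)
    simp only [decide_eq_true_eq] at henP
    have hen2 : 0 ≤ en.2 := hidx _ (List.getElem_mem hplt)
    have hens : -s ≤ en.1 := by omega
    refine Or.inr ⟨?_, ⟨by omega, by omega⟩, ?_⟩
    · rw [pvMemPairs_iff_npairs]
      have : ((-(-en.1) : Int), en.2) = en := by
        refine Prod.ext (by omega) rfl
      rw [this]
      exact (hperm.mem_iff.mp (List.getElem_mem hplt))
    · intro q hq hqe
      rcases hkey q hq hqe with ⟨j, hj, hpj, hje⟩
      rcases Nat.eq_or_lt_of_le hpj with rfl | hjlt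
      · obtain ⟨h1, h2⟩ := Prod.ext_iff.mp hje
        rw [← hendef] at h1 h2
        simp only [] at h1 h2
        right
        exact ⟨by show q.1 = -en.1; omega, by show en.2 ≤ q.2; omega⟩
      · have hlt := (List.pairwise_iff_getElem.mp hsort) pos j hplt hj hjlt
        rw [hje] at hlt
        rcases hlt with h | ⟨h1, h2⟩
        · left
          show q.1 < -en.1
          simp only [hendef] at h ⊢
          omega
        · right
          refine ⟨?_, ?_⟩
          · show q.1 = -en.1
            simp only [hendef] at h1 ⊢
            omega
          · show en.2 ≤ q.2
            simp only [hendef] at h2 ⊢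
            omega
  · rw [if_neg hc]
    refine Or.inl ⟨rfl, ?_⟩
    intro q hq hqe
    rcases hkey q hq hqe with ⟨j, hj, hpj, hje⟩
    have hplt : pos < pool.length := by omega
    have hget : PySem.List.pyGetD pool ((pos : Nat) : Int) ((0:Int), (0:Int)) = pool[pos] := by
      rw [PySem.List.pyGetD_natCast, List.getD_eq_getElem?_getD, List.getElem?_eq_getElem hplt]
      rfl
    have hen1 : 0 < (pool[pos]).1 := by
      by_contra h
      exact hc ⟨hplt, by rw [hget]; omega⟩
    rcases Nat.eq_or_lt_of_le hpj with rfl | hjlt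
    · rw [hje] at hen1
      simp at hen1
      rcases hqe with ⟨h0, _⟩
      omega
    · have hlt := (List.pairwise_iff_getElem.mp hsort) pos j hplt hj hjlt
      rw [hje] at hlt
      rcases hqe with ⟨h0, _⟩
      rcases hlt with h | ⟨h1, _⟩
      · simp at h; omega
      · simp at h1; omega

theorem pvNPairs_set (tr : List Int) (k : Nat) (e : Int) (_hk : k < tr.length) :
    pvNPairs (tr.set k e) = (pvNPairs tr).set k (-e, (k : Int)) := by
  apply List.ext_getElem
  · simp [pvNPairs_length]
  · intro j h1 h2
    have hj : j < tr.length := by simpa [pvNPairs_length] using h2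
    rw [List.getElem_set]
    rw [pvNPairs_getElem _ j h1, pvNPairs_getElem _ j (by simpa [pvNPairs_length] using hj)]
    by_cases hkj : k = j
    · subst hkj
      simp [List.getElem_set_self]
    · simp [List.getElem_set_ne hkj, hkj]

theorem pvInv_update (st_niti : Int) (tr : List Int) (pool : List (Int × Int)) (s e : Int)
    (hinv : pvInv st_niti tr pool)
    (hpos : pvBisL pool (-s, 0) < pool.length)
    (hle : (PySem.List.pyGetD pool ((pvBisL pool (-s, 0) : Nat) : Int) (0, 0)).1 ≤ 0) :
    pvInv st_niti
      (PySem.List.pySetD tr (pvChoiceB pool s).2 e)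
      (pvInsort (pool.eraseIdx (pvBisL pool (-s, 0)))
        (-e, (PySem.List.pyGetD pool ((pvBisL pool (-s, 0) : Nat) : Int) (0, 0)).2)) := by
  obtain ⟨hlen, hsort, hperm⟩ := hinv
  set pos := pvBisL pool (-s, 0) with hposdef
  have hget : PySem.List.pyGetD pool ((pos : Nat) : Int) ((0:Int), (0:Int)) = pool[pos] := by
    rw [PySem.List.pyGetD_natCast, List.getD_eq_getElem?_getD, List.getElem?_eq_getElem hpos]
    rfl
  have hmem : pool[pos] ∈ pvNPairs tr := hperm.mem_iff.mp (List.getElem_mem hpos)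
  rcases (pvNPairs_mem tr _).mp hmem with ⟨k, hk, hpk⟩
  have hch : (pvChoiceB pool s).2 = (k : Int) := by
    unfold pvChoiceB
    rw [if_pos ⟨hpos, hle⟩, hget, hpk]
  have hnit : (PySem.List.pyGetD pool ((pos : Nat) : Int) ((0:Int),(0:Int))).2 = (k : Int) := by
    rw [hget, hpk]
  rw [hch, hnit, PySem.List.pySetD_natCast]
  refine ⟨by simpa using hlen, ?_, ?_⟩
  · -- Pairwise
    have hne_pool : pool.Pairwise (fun p q => p.2 ≠ q.2) :=
      ((List.Perm.pairwise_iff (fun {a b} h => Ne.symm h) hperm).mpr (pvNPairs_idx_ne tr))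
    have hcons : (pool[pos] :: pool.eraseIdx pos).Pairwise (fun p q => p.2 ≠ q.2) :=
      (List.Perm.pairwise_iff (fun {a b} h => Ne.symm h) (pvPerm_cons_eraseIdx pool pos hpos)).mp hne_pool
    have hrest_sorted : (pool.eraseIdx pos).Pairwise pvLT :=
      hsort.sublist (List.eraseIdx_sublist pool pos)
    apply pvInsort_pairwise _ _ hrest_sorted
    intro q hq
    have := (List.pairwise_cons.mp hcons).1 q hq
    rw [hpk] at this
    simpa using Ne.symm this
  · -- Perm
    have P1 : (pool[pos] :: pool.eraseIdx pos).Perm (pvNPairs tr) :=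
      (pvPerm_cons_eraseIdx pool pos hpos).symm.trans hperm
    have hkn : k < (pvNPairs tr).length := by simpa [pvNPairs_length] using hk
    have hnk : (pvNPairs tr)[k] = pool[pos] := by
      rw [pvNPairs_getElem _ k hkn, hpk]
    have P3 : (pvNPairs tr).Perm (pool[pos] :: (pvNPairs tr).eraseIdx k) := by
      have := pvPerm_cons_eraseIdx (pvNPairs tr) k hkn
      rwa [hnk] at this
    have P4 : (pool.eraseIdx pos).Perm ((pvNPairs tr).eraseIdx k) :=
      (P1.trans P3).cons_inv
    have P5 : (pvNPairs (tr.set k e)).Perm ((-e, (k : Int)) :: (pvNPairs tr).eraseIdx k) := by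
      rw [pvNPairs_set tr k e hk]
      exact pvPerm_set_cons_eraseIdx _ k _ hkn
    exact (pvInsort_perm _ _).trans ((P4.cons _).trans P5.symm)

theorem pvInv_init (st_niti : Int) :
    pvInv st_niti (List.replicate st_niti.toNat 0)
      ((PySem.List.pyRange 0 st_niti 1).map (fun nit => ((0 : Int), nit))) := by
  have heq : (PySem.List.pyRange 0 st_niti 1).map (fun nit => ((0 : Int), nit)) =
      pvNPairs (List.replicate st_niti.toNat 0) := by
    apply List.ext_getElem
    · simp [pvNPairs_length, PySem.List.length_pyRange_one]
    · intro j h1 h2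
      rw [List.getElem_map, PySem.List.getElem_pyRange_one,
        pvNPairs_getElem _ j h2]
      simp
  refine ⟨by simp, ?_, by rw [heq]⟩
  rw [List.pairwise_map]
  refine (PySem.List.pairwise_lt_pyRange_one _ _).imp ?_
  intro a b h
  exact Or.inr ⟨rfl, h⟩

theorem pvSelect (st_niti : Int) (tr : List Int) (pool : List (Int × Int)) (s : Int)
    (hinv : pvInv st_niti tr pool) : pvSelA tr s = pvChoiceB pool s :=
  pvBest_unique s (pvPairs tr) _ _
    (by rw [pvSelA_eq_pairs tr s]
        exact pvFold_best s (pvPairs tr) (pvPairs_pairwise tr))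
    (pvChoiceB_best st_niti tr pool s hinv)

theorem pvMain (st_niti : Int) (l : List (Int × Int)) (tr : List Int)
    (pool : List (Int × Int)) (cnt : Int) (out : List Int)
    (hinv : pvInv st_niti tr pool) :
    (l.foldl (fun (st : List Int × Int × List Int) interval =>
      let mi := pvSelA st.1 interval.1
      if mi.2 ≠ -1 then
        (PySem.List.pySetD st.1 mi.2 interval.2, st.2.1 + 1, st.2.2 ++ [mi.2 + 1])
      else
        (st.1, st.2.1, st.2.2 ++ [0])) (tr, cnt, out)).2.2 =
    (l.foldl (fun (st : List (Int × Int) × List Int) (iv : Int × Int) =>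
      let pos := pvBisL st.1 (-iv.1, 0)
      if pos < st.1.length ∧ (PySem.List.pyGetD st.1 (pos : Int) (0, 0)).1 ≤ 0 then
        let nit := (PySem.List.pyGetD st.1 (pos : Int) (0, 0)).2
        (pvInsort (st.1.eraseIdx pos) (-iv.2, nit), st.2 ++ [nit + 1])
      else
        (st.1, st.2 ++ [0])) (pool, out)).2 := by
  induction l generalizing tr pool cnt out with
  | nil => rfl
  | cons iv t ih =>
    simp only [List.foldl_cons]
    have hsel := pvSelect st_niti tr pool iv.1 hinv
    by_cases hc : pvBisL pool (-iv.1, 0) < pool.length ∧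
        (PySem.List.pyGetD pool ((pvBisL pool (-iv.1, 0) : Nat) : Int) (0, 0)).1 ≤ 0
    · -- both take the assign branch
      have hposlt := hc.1
      have hget : PySem.List.pyGetD pool ((pvBisL pool (-iv.1, 0) : Nat) : Int) ((0:Int),(0:Int))
          = pool[pvBisL pool (-iv.1, 0)] := by
        rw [PySem.List.pyGetD_natCast, List.getD_eq_getElem?_getD, List.getElem?_eq_getElem hposlt]
        rfl
      have hmem : pool[pvBisL pool (-iv.1, 0)] ∈ pvNPairs tr :=
        hinv.2.2.mem_iff.mp (List.getElem_mem hposlt)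
      rcases (pvNPairs_mem tr _).mp hmem with ⟨k, hk, hpk⟩
      have hch : pvChoiceB pool iv.1 =
          (-(pool[pvBisL pool (-iv.1, 0)]).1, (pool[pvBisL pool (-iv.1, 0)]).2) := by
        unfold pvChoiceB
        rw [if_pos hc, hget]
      have hmi2 : (pvSelA tr iv.1).2 = (k : Int) := by
        rw [hsel, hch, hpk]
      have hne : (pvSelA tr iv.1).2 ≠ -1 := by rw [hmi2]; omega
      rw [if_pos hne]
      -- B side: condition holds
      rw [if_pos hc]
      have hnit : (PySem.List.pyGetD pool ((pvBisL pool (-iv.1, 0) : Nat) : Int) ((0:Int),(0:Int))).2 = (k : Int) := by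
        rw [hget, hpk]
      rw [hmi2, hnit]
      exact ih _ _ _ _ (by
        have := pvInv_update st_niti tr pool iv.1 iv.2 hinv hc.1 hc.2
        rwa [hch, hpk, hnit] at this)
    · -- both take the zero branch
      have hmi : pvSelA tr iv.1 = (-1, -1) := by
        rw [hsel]; unfold pvChoiceB; rw [if_neg hc]
      rw [if_neg (by rw [hmi]; simp), if_neg hc]
      exact ih _ _ _ _ hinv

-- ===== VERDICT (by name: the statement is the Claim_ definition above) =====
theorem razvrscanje_vecnitno_naivno_spec : Claim_equal_razvrscanje_vecnitno_naivno := by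
  intro intervali st_niti _
  unfold Spec_razvrscanje_vecnitno_naivno razvrscanje_vecnitno_naivno razvrscanje_vecnitno_naivno_alt
  refine Prod.ext rfl ?_
  exact pvMain st_niti (PySem.List.sorted intervali (fun x => x.2))
    (List.replicate st_niti.toNat 0)
    ((PySem.List.pyRange 0 st_niti 1).map (fun nit => ((0 : Int), nit))) 0 []
    (pvInv_init st_niti)
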